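-- pv_equiv track=rewrite | github.com/ilambrev/freeCodeCamp-Daily-Challenges | Python_Solutions/2026_02/2026_02_27_matrix_shift.py | shift_matrix
-- ===== SOURCE A (Python) =====
-- def shift_matrix(matrix, shift):
--     row_len = len(matrix[0])
--
--     arr = [num for row in matrix for num in row]
--
--     shift = shift % len(arr)
--
--     if shift > 0:
--         arr = arr[len(arr)-shift:] + arr[:len(arr)-shift]
--     elif shift < 0:
--         arr = arr[shift:] + arr[:shift+1]
--
--     return [arr[i:i+row_len] for i in range(0, len(arr), row_len)]
-- ===== SOURCE B (Python) =====
-- def shift_matrix(matrix, shift):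
--     row_len = len(matrix[0])
--     n = sum(len(row) for row in matrix)
--     k = shift % n
--     out = [0] * n
--     q = 0
--     for row in matrix:
--         for num in row:
--             out[(q + k) % n] = num
--             q += 1
--     return [out[i:i + row_len] for i in range(0, n, row_len)]
-- ===== Notes on version B (the rewrite author's own statement) =====
-- stated objective: alternative
-- what changed: Instead of flattening, rotating by slice concatenation and re-chunking, B never builds the flattened list: it makes a single pass over the matrix with a running counter, scattering each element directly into its destination slot of a preallocated flat buffer (write-side rotation), then chunks the buffer into rows.
import Mathlib
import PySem

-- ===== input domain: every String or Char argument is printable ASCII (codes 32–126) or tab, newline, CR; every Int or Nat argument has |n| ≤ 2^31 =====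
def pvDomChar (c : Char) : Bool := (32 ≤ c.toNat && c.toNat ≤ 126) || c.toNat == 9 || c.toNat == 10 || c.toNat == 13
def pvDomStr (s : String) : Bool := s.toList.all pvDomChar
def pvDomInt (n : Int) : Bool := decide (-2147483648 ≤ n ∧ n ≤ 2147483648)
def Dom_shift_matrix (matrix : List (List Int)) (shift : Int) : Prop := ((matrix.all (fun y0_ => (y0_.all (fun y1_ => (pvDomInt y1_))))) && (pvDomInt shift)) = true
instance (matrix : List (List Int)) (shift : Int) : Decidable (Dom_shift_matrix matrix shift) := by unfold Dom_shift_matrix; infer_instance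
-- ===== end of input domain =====

-- B replaces A's flatten → slice-rotate → chunk pipeline by a single scatter pass over the matrix
-- with a running counter, writing each element into its destination slot of a preallocated flat
-- buffer, then chunking that buffer; same cost (objective: alternative).


-- ===== PORT A =====
def shift_matrix (matrix : List (List Int)) (shift : Int) : List (List Int) :=
  let row_len : Int := (((PySem.List.pyGet? matrix 0).getD []).length : Int)   -- len(matrix[0]); Pre_ excludes matrix = []
  let arr : List Int := matrix.flatMap id                                      -- [num for row in matrix for num in row]
  let shift : Int := PySem.Int.mod shift (arr.length : Int)                    -- shift % len(arr); Pre_ excludes len(arr) = 0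
  let arr : List Int :=
    if shift > 0 then
      PySem.List.slice arr (some ((arr.length : Int) - shift)) none ++
        PySem.List.slice arr none (some ((arr.length : Int) - shift))
    else if shift < 0 then
      PySem.List.slice arr (some shift) none ++ PySem.List.slice arr none (some (shift + 1))
    else arr
  (PySem.List.pyRange 0 (arr.length : Int) row_len).map
    (fun i => PySem.List.slice arr (some i) (some (i + row_len)))              -- Pre_ excludes row_len = 0 (range step 0)

-- ===== PORT B =====
-- destination slot of the element with running counter q:  (q + k) % n
def pvDest (k n q : Int) : Nat := (PySem.Int.mod (q + k) n).toNat
-- one scatter step:  out[(q + k) % n] = num; q += 1   (index is in range on Pre_ inputs, so toNat is exact)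
def pvScatStep (k n : Int) (st : List Int × Int) (num : Int) : List Int × Int :=
  (st.1.set (pvDest k n st.2) num, st.2 + 1)

def shift_matrix_alt (matrix : List (List Int)) (shift : Int) : List (List Int) :=
  let row_len : Int := (((PySem.List.pyGet? matrix 0).getD []).length : Int)   -- len(matrix[0])
  let n : Int := (matrix.map (fun row => (row.length : Int))).sum              -- sum(len(row) for row in matrix)
  let k : Int := PySem.Int.mod shift n                                         -- shift % n
  let st : List Int × Int :=
    matrix.foldl (fun st row => row.foldl (pvScatStep k n) st)
      (List.replicate n.toNat 0, 0)                                            -- out = [0]*n; q = 0; nested for loops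
  (PySem.List.pyRange 0 n row_len).map
    (fun i => PySem.List.slice st.1 (some i) (some (i + row_len)))

-- ===== PRECONDITION & SPEC =====
-- Pre_ excludes exactly the inputs where A raises: an empty matrix (IndexError on matrix[0]),
-- an empty flattened list (ZeroDivisionError on shift % 0), and an empty first row with a
-- nonempty flattening (ValueError: range() arg 3 must not be zero). A nonempty first row rules out all three.
def Pre_shift_matrix (matrix : List (List Int)) (shift : Int) : Prop :=
  matrix.headD [] ≠ []
instance (matrix : List (List Int)) (shift : Int) : Decidable (Pre_shift_matrix matrix shift) := by
  unfold Pre_shift_matrix; infer_instance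

def pvWitness_shift_matrix : List (List Int) × Int := ([[1, 2], [3, 4]], 3)

def Spec_shift_matrix (matrix : List (List Int)) (shift : Int) (out : List (List Int)) : Prop := out = shift_matrix_alt matrix shift
instance (matrix : List (List Int)) (shift : Int) (out : List (List Int)) : Decidable (Spec_shift_matrix matrix shift out) := by unfold Spec_shift_matrix; infer_instance

-- ===== CLAIM (what is proved, stated in full; the proofs are below) =====
def Claim_equal_shift_matrix : Prop := ∀ (matrix : List (List Int)) (shift : Int), Dom_shift_matrix matrix shift → Pre_shift_matrix matrix shift → Spec_shift_matrix matrix shift (shift_matrix matrix shift)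

-- ===== LEMMAS AND PROOFS =====

-- the nested scatter fold over the matrix is the flat scatter fold over its flattening
lemma foldl_nested (matrix : List (List Int)) (f : List Int × Int → Int → List Int × Int) :
    ∀ (init : List Int × Int),
      matrix.foldl (fun st row => row.foldl f st) init = (matrix.flatMap id).foldl f init := by
  induction matrix with
  | nil => intro init; simp
  | cons r rest ih =>
      intro init
      simp [List.flatMap_cons, List.foldl_append, ih]

-- the scatter fold preserves the buffer length
lemma scat_length (k n : Int) (l : List Int) :
    ∀ (out : List Int) (q : Int), ((l.foldl (pvScatStep k n) (out, q)).1).length = out.length := by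
  induction l with
  | nil => intro out q; simp
  | cons v rest ih =>
      intro out q
      simp [pvScatStep, ih]

-- frame: positions no remaining step writes to are untouched
lemma scat_frame (k n : Int) (l : List Int) :
    ∀ (out : List Int) (q : Int) (p : Nat),
      (∀ j : Nat, j < l.length → pvDest k n (q + (j : Int)) ≠ p) →
      ((l.foldl (pvScatStep k n) (out, q)).1)[p]? = out[p]? := by
  induction l with
  | nil => intro out q p _; simp
  | cons v rest ih =>
      intro out q p h
      have h0 : pvDest k n q ≠ p := by
        have := h 0 (by simp)
        simpa using this
      have hrest : ∀ j : Nat, j < rest.length → pvDest k n ((q + 1) + (j : Int)) ≠ p := by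
        intro j hj
        have := h (j + 1) (by simp; omega)
        have he : q + ((j : Int) + 1) = (q + 1) + (j : Int) := by ring
        simpa [Nat.cast_add, he] using this
      calc ((List.foldl (pvScatStep k n) (out.set (pvDest k n q) v, q + 1) rest)).1[p]?
          = (out.set (pvDest k n q) v)[p]? := ih _ _ _ hrest
        _ = out[p]? := by rw [List.getElem?_set]; simp [h0]

-- hit: the j-th remaining element ends up at its destination (if no later step overwrites it)
lemma scat_hit (k n : Int) (l : List Int) :
    ∀ (out : List Int) (q : Int) (j : Nat) (hj : j < l.length),
      (∀ j' : Nat, j < j' → j' < l.length →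
          pvDest k n (q + (j' : Int)) ≠ pvDest k n (q + (j : Int))) →
      pvDest k n (q + (j : Int)) < out.length →
      ((l.foldl (pvScatStep k n) (out, q)).1)[pvDest k n (q + (j : Int))]? = some l[j] := by
  induction l with
  | nil => intro out q j hj; exact absurd hj (by simp)
  | cons v rest ih =>
      intro out q j hj huniq hlt
      cases j with
      | zero =>
          simp only [Nat.cast_zero, add_zero] at huniq hlt ⊢
          have hfr : ∀ j' : Nat, j' < rest.length →
              pvDest k n ((q + 1) + (j' : Int)) ≠ pvDest k n q := by
            intro j' hj'
            have := huniq (j' + 1) (by omega) (by simp; omega)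
            have he : q + ((j' : Int) + 1) = (q + 1) + (j' : Int) := by ring
            simpa [Nat.cast_add, he] using this
          simp only [List.foldl_cons, pvScatStep]
          rw [scat_frame k n rest _ _ _ hfr]
          rw [List.getElem?_set]
          simp [hlt]
      | succ j' =>
          simp only [List.foldl_cons, pvScatStep]
          have he : q + ((j' : Int) + 1) = (q + 1) + (j' : Int) := by ring
          have := ih (out.set (pvDest k n q) v) (q + 1) j' (by simpa using hj)
            (by intro j'' h1 h2
                have := huniq (j'' + 1) (by omega) (by simp; omega)
                have he2 : q + ((j'' : Int) + 1) = (q + 1) + (j'' : Int) := by ring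
                simpa [Nat.cast_add, he, he2] using this)
            (by simpa [Nat.cast_add, he] using hlt)
          simpa [Nat.cast_add, he] using this

-- the scattered buffer, elementwise: position p holds arr[(p - k) % n]
lemma scat_getElem? (k : Int) (arr : List Int)
    (p : Nat) (hp : p < arr.length) :
    ((arr.foldl (pvScatStep k (arr.length : Int)) (List.replicate arr.length 0, 0)).1)[p]?
      = arr[(((p : Int) - k) % (arr.length : Int)).toNat]? := by
  set n : Int := (arr.length : Int) with hn
  have hnpos : 0 < n := by omega
  set j : Nat := (((p : Int) - k) % n).toNat with hjdef
  have hjmod : (((p : Int) - k) % n) = (j : Int) := by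
    rw [hjdef, Int.toNat_of_nonneg (Int.emod_nonneg _ (by omega))]
  have hjlt : j < arr.length := by
    have := Int.emod_lt_of_pos ((p : Int) - k) hnpos
    omega
  have hdest : pvDest k n ((0 : Int) + (j : Int)) = p := by
    unfold pvDest
    rw [PySem.Int.mod_eq_emod_of_pos hnpos]
    have h1 : ((j : Int) + k) % n = (p : Int) := by
      rw [← hjmod, Int.emod_add_emod, sub_add_cancel,
        Int.emod_eq_of_lt (by omega) (by omega)]
    simp [h1]
  have huniq : ∀ j' : Nat, j < j' → j' < arr.length →
      pvDest k n ((0 : Int) + (j' : Int)) ≠ pvDest k n ((0 : Int) + (j : Int)) := by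
    intro j' h1 h2 hEq
    unfold pvDest at hEq
    rw [PySem.Int.mod_eq_emod_of_pos hnpos, PySem.Int.mod_eq_emod_of_pos hnpos] at hEq
    have e1 : 0 ≤ ((0 : Int) + (j' : Int) + k) % n := Int.emod_nonneg _ (by omega)
    have e2 : 0 ≤ ((0 : Int) + (j : Int) + k) % n := Int.emod_nonneg _ (by omega)
    have hEqI : ((0 : Int) + (j' : Int) + k) % n = ((0 : Int) + (j : Int) + k) % n := by omega
    have hd : ((j' : Int) - (j : Int)) % n = 0 := by
      have hz := Int.emod_eq_emod_iff_emod_sub_eq_zero.mp hEqI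
      have he : (0 : Int) + (j' : Int) + k - ((0 : Int) + (j : Int) + k) = (j' : Int) - (j : Int) := by ring
      rwa [he] at hz
    rw [Int.emod_eq_of_lt (by omega) (by omega)] at hd
    omega
  have hlt : pvDest k n ((0 : Int) + (j : Int)) < (List.replicate arr.length (0 : Int)).length := by
    rw [hdest]; simpa using hp
  have := scat_hit k n arr (List.replicate arr.length 0) 0 j hjlt huniq hlt
  rw [hdest] at this
  rw [this, List.getElem?_eq_getElem (by omega)]

-- A's slice-rotation, elementwise: same modular characterisation
lemma rot_getElem? (k : Int) (arr : List Int) (hk0 : 0 ≤ k) (hk1 : k < (arr.length : Int))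
    (p : Nat) (hp : p < arr.length) :
    (arr.drop ((arr.length : Int) - k).toNat ++ arr.take ((arr.length : Int) - k).toNat)[p]?
      = arr[(((p : Int) - k) % (arr.length : Int)).toNat]? := by
  set n : Int := (arr.length : Int) with hn
  set m : Nat := (n - k).toNat with hm
  have hmlen : m ≤ arr.length := by omega
  have hdlen : (arr.drop m).length = k.toNat := by simp; omega
  by_cases hc : p < k.toNat
  · rw [List.getElem?_append_left (by omega), List.getElem?_drop]
    have : (((p : Int) - k) % n) = (p : Int) - k + n := by
      have h2 := Int.add_mul_emod_self_left (a := (p : Int) - k) (b := n) (c := 1)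
      rw [mul_one] at h2
      rw [← h2, Int.emod_eq_of_lt (by omega) (by omega)]
    rw [this]
    congr 1
    omega
  · rw [List.getElem?_append_right (by omega), hdlen,
      List.getElem?_take_of_lt (by omega)]
    have : (((p : Int) - k) % n) = (p : Int) - k := Int.emod_eq_of_lt (by omega) (by omega)
    rw [this]
    congr 1
    omega

-- total count: sum of Int-cast row lengths = length of the flattening
lemma sum_lengths (matrix : List (List Int)) :
    (matrix.map (fun row => ((row.length : Int)))).sum = ((matrix.flatMap id).length : Int) := by
  induction matrix with
  | nil => simp
  | cons r rest ih => simp [ih]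

-- A = B on every input with a nonempty first row
lemma shift_matrix_eq_alt (matrix : List (List Int)) (shift : Int)
    (hpre : Pre_shift_matrix matrix shift) :
    shift_matrix matrix shift = shift_matrix_alt matrix shift := by
  simp only [shift_matrix, shift_matrix_alt]
  rw [sum_lengths, foldl_nested]
  set arr := matrix.flatMap id with harr
  have harrne : arr ≠ [] := by
    cases matrix with
    | nil => simp [Pre_shift_matrix] at hpre
    | cons m0 rest =>
      cases m0 with
      | nil => simp [Pre_shift_matrix] at hpre
      | cons a t => simp [harr]
  have hn : 0 < (arr.length : Int) := by
    have := List.length_pos_iff.mpr harrne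
    omega
  set n : Int := (arr.length : Int) with hndef
  set k := PySem.Int.mod shift n with hkdef
  have hk0 : 0 ≤ k := by apply PySem.Int.mod_nonneg; exact hn
  have hk1 : k < n := by apply PySem.Int.mod_lt; exact hn
  have hrepl : n.toNat = arr.length := by omega
  set B1 := (arr.foldl (pvScatStep k n) (List.replicate n.toNat 0, 0)).1 with hB1
  have hB1len : B1.length = arr.length := by
    rw [hB1, scat_length]; simp [hrepl]
  -- A's rotated flat list
  set LA := (if k > 0 then
      PySem.List.slice arr (some (n - k)) none ++ PySem.List.slice arr none (some (n - k))
    else if k < 0 then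
      PySem.List.slice arr (some k) none ++ PySem.List.slice arr none (some (k + 1))
    else arr) with hLA
  have hLAdt : LA = arr.drop (n - k).toNat ++ arr.take (n - k).toNat := by
    rw [hLA]
    by_cases hpos : k > 0
    · rw [if_pos hpos, PySem.List.slice_from _ (by omega), PySem.List.slice_to _ (by omega)]
    · have hz : k = 0 := by omega
      rw [if_neg hpos, if_neg (by omega), hz]
      simp [hrepl]
  have hLAlen : LA.length = arr.length := by
    rw [hLAdt]; simp; omega
  have hmain : LA = B1 := by
    apply List.ext_getElem?
    intro p
    by_cases hp : p < arr.length
    · rw [hLAdt, rot_getElem? k arr hk0 hk1 p hp]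
      rw [hB1, hrepl, ← hndef, scat_getElem? k arr p hp]
    · rw [List.getElem?_eq_none (by omega), List.getElem?_eq_none (by omega)]
  rw [hmain, hB1len, ← hndef]

-- ===== VERDICT (by name: the statement is the Claim_ definition above) =====
theorem shift_matrix_spec : Claim_equal_shift_matrix := by
  intro matrix shift _ hpre
  unfold Spec_shift_matrix
  exact shift_matrix_eq_alt matrix shift hpre
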